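-- pv_equiv track=rewrite | github.com/issflab/ssl-antispoofing | scripts/create_protocols.py | infer_label_idx
-- ===== SOURCE A (Python) =====
-- from typing import Iterable, Sequence
--
-- LABEL_VALUES = {"bonafide", "spoof"}
--
-- def normalize_label(token: str) -> str | None:
--     lowered = token.strip().lower()
--     return lowered if lowered in LABEL_VALUES else None
--
-- def infer_label_idx(rows: Sequence[list[str]]) -> int | None:
--     if not rows:
--         return None
--     width = max(len(row) for row in rows)
--     scores: list[tuple[int, int]] = []
--     for idx in range(width):
--         labels = 0
--         total = 0
--         for row in rows:
--             if idx >= len(row):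
--                 continue
--             total += 1
--             if normalize_label(row[idx]) is not None:
--                 labels += 1
--         if total and labels == total:
--             scores.append((idx, labels))
--     if scores:
--         return scores[-1][0]
--     return None
-- ===== SOURCE B (Python) =====
-- LABEL_VALUES = {"bonafide", "spoof"}
--
-- def normalize_label(token):
--     lowered = token.strip().lower()
--     return lowered if lowered in LABEL_VALUES else None
--
-- def infer_label_idx(rows):
--     if not rows:
--         return None
--     stats = {}
--     for row in rows:
--         for i, cell in enumerate(row):
--             valid, total = stats.get(i, (0, 0))
--             if normalize_label(cell) is not None:
--                 valid += 1
--             stats[i] = (valid, total + 1)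
--     best = None
--     for i, (valid, total) in stats.items():
--         if total and valid == total and (best is None or i > best):
--             best = i
--     return best
-- ===== Notes on version B (the rewrite author's own statement) =====
-- stated objective: alternative
-- what changed: A scans every row once per column index (width * rows passes) and appends qualifying columns to a scores list, returning the last; B makes a single pass over the rows accumulating per-column (valid, total) counters in a dict via enumerate, then returns the maximum column index whose cells are all valid labels.
import Mathlib
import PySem

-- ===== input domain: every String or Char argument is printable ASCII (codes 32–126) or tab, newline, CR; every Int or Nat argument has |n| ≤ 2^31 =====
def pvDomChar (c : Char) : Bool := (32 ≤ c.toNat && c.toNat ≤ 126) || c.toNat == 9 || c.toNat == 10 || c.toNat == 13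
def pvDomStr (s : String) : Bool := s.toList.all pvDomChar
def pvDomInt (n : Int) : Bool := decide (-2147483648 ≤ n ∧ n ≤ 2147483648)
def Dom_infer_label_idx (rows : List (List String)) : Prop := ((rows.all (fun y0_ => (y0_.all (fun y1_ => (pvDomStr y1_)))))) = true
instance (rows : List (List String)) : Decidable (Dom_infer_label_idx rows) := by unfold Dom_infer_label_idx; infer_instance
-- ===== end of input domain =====

-- B replaces A's per-column rescans over all rows and its scores list by a single pass over the
-- rows that accumulates per-column (valid, total) counters in a dict, then takes the maximum
-- fully-valid column index (objective: alternative; equivalence of the RETURN value is proved).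

-- ===== PORT A =====
def normalize_label (token : String) : Option String :=
  let lowered := PySem.Str.lower (PySem.Str.strip token)
  if lowered = "bonafide" || lowered = "spoof" then some lowered else none
def infer_label_idx (rows : List (List String)) : Option Int :=
  if rows = [] then none
  else
    match PySem.List.max? (rows.map (fun row => PySem.List.len row)) (fun x => x) with
    | none => none
    | some width =>
      let scores : List (Int × Int) :=
        (PySem.List.pyRange 0 width 1).foldl (fun scores idx =>
          let lt : Int × Int := rows.foldl (fun lt row =>
            if idx ≥ PySem.List.len row then lt
            else ((if (normalize_label (PySem.List.pyGetD row idx "")).isSome then lt.1 + 1 else lt.1),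
                  lt.2 + 1)) (0, 0)
          if lt.2 ≠ 0 ∧ lt.1 = lt.2 then scores ++ [(idx, lt.1)] else scores) []
      if scores ≠ [] then (PySem.List.pyGet? scores (-1)).map (fun p => p.1) else none

-- ===== PORT B =====
def infer_label_idx_alt (rows : List (List String)) : Option Int :=
  if rows = [] then none
  else
    let stats : PySem.Dict Int (Int × Int) :=
      rows.foldl (fun stats row =>
        (PySem.List.enumerate row 0).foldl (fun stats p =>
          let vt := stats.getD p.1 (0, 0)
          let valid := if (normalize_label p.2).isSome then vt.1 + 1 else vt.1
          stats.insert p.1 (valid, vt.2 + 1)) stats) PySem.Dict.empty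
    stats.items.foldl (fun (best : Option Int) (p : Int × (Int × Int)) =>
      if p.2.2 != 0 && p.2.1 == p.2.2 && (match best with | none => true | some b => decide (b < p.1))
      then some p.1 else best) none

-- ===== PRECONDITION & SPEC =====
def Spec_infer_label_idx (rows : List (List String)) (out : Option Int) : Prop := out = infer_label_idx_alt rows
instance (rows : List (List String)) (out : Option Int) : Decidable (Spec_infer_label_idx rows out) := by unfold Spec_infer_label_idx; infer_instance

-- ===== CLAIM (what is proved, stated in full; the proofs are below) =====
def Claim_equal_infer_label_idx : Prop := ∀ (rows : List (List String)), Dom_infer_label_idx rows → Spec_infer_label_idx rows (infer_label_idx rows)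

-- ===== LEMMAS AND PROOFS =====
-- model: per-column counters, the qualifying predicate, and the common answer
def pvOk (c : String) : Bool := (normalize_label c).isSome
def pvT (rows : List (List String)) (n : Nat) : Nat := rows.countP (fun r => decide (n < r.length))
def pvV (rows : List (List String)) (n : Nat) : Nat :=
  rows.countP (fun r => decide (n < r.length) && pvOk (r.getD n ""))

def pvQ (rows : List (List String)) (n : Nat) : Bool :=
  decide (pvT rows n ≠ 0 ∧ pvV rows n = pvT rows n)
def pvW (rows : List (List String)) : Nat := rows.foldl (fun m r => max m r.length) 0
def pvAns (rows : List (List String)) : Option Int :=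
  ((List.range (pvW rows)).filter (pvQ rows)).getLast?.map (fun (n : Nat) => (n : Int))

theorem countFold (rows : List (List String)) (n : Nat) (a b : Int) :
    rows.foldl (fun lt row =>
      if ((n:Int)) ≥ ((row.length : Int)) then lt
      else ((if pvOk (row.getD n "") then lt.1 + 1 else lt.1), lt.2 + 1)) (a, b)
      = (a + (pvV rows n : Int), b + (pvT rows n : Int)) := by
  induction rows generalizing a b with
  | nil => simp [pvV, pvT]
  | cons r t ih =>
    rw [List.foldl_cons]
    by_cases hl : n < r.length
    · rw [if_neg (by push_cast; omega)]
      by_cases ho : pvOk (r.getD n "") = true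
      · rw [if_pos ho, ih]
        simp only [pvV, pvT, List.countP_cons, hl, ho, decide_true, Bool.and_true, if_pos]
        refine Prod.ext ?_ ?_ <;> simp <;> push_cast <;> ring
      · rw [if_neg ho, ih]
        simp only [pvV, pvT, List.countP_cons, hl, decide_true, Bool.true_and,
          ho, if_neg, Bool.false_eq_true, not_false_eq_true]
        refine Prod.ext ?_ ?_ <;> simp [Bool.eq_false_iff.mpr ho] <;> push_cast <;> ring
    · rw [if_pos (by push_cast; omega), ih]
      simp [pvV, pvT, List.countP_cons, hl]
theorem castFoldMaxAux (rs : List (List String)) (a : Nat) :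
    List.foldl max ((a:Int)) (rs.map (fun r => PySem.List.len r)) =
      ((List.foldl (fun m r => max m r.length) a rs : Nat) : Int) := by
  induction rs generalizing a with
  | nil => simp
  | cons r t ih =>
    simp only [List.map_cons, List.foldl_cons, PySem.List.len_eq]
    rw [← Nat.cast_max]
    simpa using ih (max a r.length)

theorem castFoldMax (r0 : List String) (rs : List (List String)) :
    List.foldl max (PySem.List.len r0) (rs.map (fun r => PySem.List.len r)) =
      ((List.foldl (fun m r => max m r.length) r0.length rs : Nat) : Int) := by
  rw [show PySem.List.len r0 = ((r0.length : Nat) : Int) from PySem.List.len_eq r0]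
  exact castFoldMaxAux rs r0.length

theorem a_eq_ans (rows : List (List String)) (h : rows ≠ []) : infer_label_idx rows = pvAns rows := by
  obtain ⟨r, rs, rfl⟩ := List.exists_cons_of_ne_nil h
  unfold infer_label_idx
  rw [if_neg h]
  simp only [List.map_cons, PySem.List.max?_id_cons]
  rw [castFoldMax]
  have hW : List.foldl (fun m r => max m r.length) r.length rs = pvW (r :: rs) := by
    simp [pvW]
  rw [hW, PySem.List.pyRange_zero_natCast]
  rw [PySem.List.foldl_congr_mem _ _
      (fun scores idx => if (pvQ (r :: rs) idx.toNat) = true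
        then scores ++ [(idx, ((pvV (r :: rs) idx.toNat : Nat) : Int))] else scores) _ ?_]
  · rw [PySem.List.foldl_append_if, List.nil_append, List.filter_map]
    have hcomp : ((fun idx => pvQ (r :: rs) idx.toNat) ∘ fun (k : Nat) => (k : Int)) = pvQ (r :: rs) := by
      funext n; simp
    rw [hcomp]
    rcases hL : ((List.range (pvW (r :: rs))).filter (pvQ (r :: rs))).getLast? with _ | n
    · rw [List.getLast?_eq_none_iff] at hL
      simp [hL, pvAns, List.getLast?_eq_none_iff.mpr, hL]
    · have hne : (List.range (pvW (r :: rs))).filter (pvQ (r :: rs)) ≠ [] := by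
        intro hnil; rw [hnil] at hL; simp at hL
      rw [if_pos (by simp [hne]), PySem.List.pyGet?_neg_one, List.map_map, List.getLast?_map, hL]
      simp [pvAns, hL]
  · intro acc x hx
    rw [List.mem_map] at hx
    obtain ⟨n, hn, rfl⟩ := hx
    have hc : List.foldl (fun lt (row : List String) =>
          if ((n:Int)) ≥ PySem.List.len row then lt
          else ((if (normalize_label (PySem.List.pyGetD row (n:Int) "")).isSome then lt.1 + 1 else lt.1),
                lt.2 + 1)) (0, 0) (r :: rs) = (0 + (pvV (r :: rs) n : Int), 0 + (pvT (r :: rs) n : Int)) := by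
      rw [PySem.List.foldl_congr_mem _ _ (fun lt row =>
          if ((n:Int)) ≥ ((row.length : Int)) then lt
          else ((if pvOk (row.getD n "") then lt.1 + 1 else lt.1), lt.2 + 1)) _ ?_]
      · exact countFold (r :: rs) n 0 0
      · intro acc row _
        simp [pvOk, PySem.List.pyGetD_natCast, PySem.List.len_eq]
    simp only [hc]
    simp only [Int.toNat_natCast, zero_add]
    by_cases hq : pvQ (r :: rs) n = true
    · rw [if_pos hq, if_pos]
      have := of_decide_eq_true hq
      exact ⟨by exact_mod_cast this.1, by exact_mod_cast this.2⟩
    · rw [if_neg hq, if_neg]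
      intro hcon
      apply hq
      exact decide_eq_true (by exact_mod_cast hcon)
def pvBump (vt : Int × Int) (c : String) : Int × Int :=
  ((if pvOk c then vt.1 + 1 else vt.1), vt.2 + 1)

theorem innerB (cells : List String) : ∀ (s M : Nat) (g : Nat → Int × Int)
    (d : PySem.Dict Int (Int × Int)), s ≤ M →
    d.items = (List.range M).map (fun (n : Nat) => ((n:Int), g n)) →
    ((PySem.List.enumerate cells ((s:Nat):Int)).foldl (fun stats p =>
        let vt := stats.getD p.1 (0, 0)
        let valid := if (normalize_label p.2).isSome then vt.1 + 1 else vt.1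
        stats.insert p.1 (valid, vt.2 + 1)) d).items
      = (List.range (max M (s + cells.length))).map (fun (n : Nat) => ((n:Int),
          if s ≤ n ∧ n < s + cells.length
          then pvBump (if n < M then g n else (0, 0)) (cells.getD (n - s) "")
          else g n)) := by
  induction cells with
  | nil =>
    intro s M g d hsM hitems
    simp only [PySem.List.enumerate_nil, List.foldl_nil, List.length_nil, Nat.add_zero,
      Nat.max_eq_left hsM, hitems]
    refine List.map_congr_left ?_
    intro n hn
    rw [if_neg (by omega)]
  | cons c cs ih =>
    intro s M g d hsM hitems
    have hnk : d.keys.Nodup := by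
      have : d.keys = (List.range M).map (fun (n : Nat) => ((n:Int))) := by
        simp only [PySem.Dict.keys, hitems, List.map_map]; rfl
      rw [this]
      exact (List.nodup_range).map (fun a b => by exact_mod_cast id)
    have hkeys : d.keys = (List.range M).map (fun (n : Nat) => ((n:Int))) := by
      simp only [PySem.Dict.keys, hitems, List.map_map]; rfl
    rw [PySem.List.enumerate_cons, List.foldl_cons]
    -- the dict after one cell
    set g1 : Nat → Int × Int :=
      fun n => if n = s then pvBump (if n < M then g n else (0, 0)) c else g n with hg1
    have hd1 : (d.insert ((s:Nat):Int) (pvBump (d.getD ((s:Nat):Int) (0, 0)) c)).items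
        = (List.range (max M (s + 1))).map (fun (n : Nat) => ((n:Int), g1 n)) := by
      by_cases hs : s < M
      · have hmem : (((s:Nat):Int), g s) ∈ d.items := by
          rw [hitems]
          exact List.mem_map.mpr ⟨s, List.mem_range.mpr hs, rfl⟩
        have hgetD : d.getD ((s:Nat):Int) (0, 0) = g s :=
          PySem.Dict.getD_of_mem_items d hmem hnk (0, 0)
        have hcont : d.contains ((s:Nat):Int) = true := by
          rw [PySem.Dict.contains_eq_decide_mem_keys, hkeys]
          simp only [decide_eq_true_eq, List.mem_map]
          exact ⟨s, List.mem_range.mpr hs, rfl⟩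
        rw [hgetD, PySem.Dict.items_insert_of_contains d _ hcont, hitems, List.map_map,
          Nat.max_eq_left (by omega)]
        refine List.map_congr_left ?_
        intro n hn
        simp only [Function.comp]
        by_cases hns : n = s
        · subst hns
          simp [hg1, hs]
        · have : (((n:Nat):Int) == ((s:Nat):Int)) = false := by
            simp [Nat.cast_inj]; omega
          simp [this, hg1, hns]
      · have hsM' : s = M := by omega
        have hcont : d.contains ((s:Nat):Int) = false := by
          rw [PySem.Dict.contains_eq_decide_mem_keys, hkeys]
          simp only [decide_eq_false_iff_not, List.mem_map]
          rintro ⟨m, hm, hms⟩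
          have : m = s := by exact_mod_cast hms
          have := List.mem_range.mp hm
          omega
        have hgetD : d.getD ((s:Nat):Int) (0, 0) = (0, 0) :=
          PySem.Dict.getD_of_not_contains d _ hcont
        rw [hgetD, PySem.Dict.items_insert_of_not_contains d _ hcont, hitems,
          show max M (s + 1) = M + 1 from by omega, List.range_succ, List.map_append, List.map_cons,
          List.map_nil]
        congr 1
        · refine List.map_congr_left ?_
          intro n hn
          have : n ≠ s := by have := List.mem_range.mp hn; omega
          simp [hg1, this]
        · subst hsM'
          simp [hg1, lt_irrefl]
    rw [show ((s:Nat):Int) + 1 = (((s + 1 : Nat)):Int) from by push_cast; ring]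
    have key := ih (s + 1) (max M (s + 1)) g1
      (d.insert ((s:Nat):Int) (pvBump (d.getD ((s:Nat):Int) (0, 0)) c)) (by omega) hd1
    refine key.trans ?_
    rw [show max (max M (s + 1)) (s + 1 + cs.length) = max M (s + (c :: cs).length) from by
      simp only [List.length_cons]; omega]
    refine List.map_congr_left ?_
    intro n hn
    by_cases hns : n = s
    · subst hns
      rw [if_neg (by omega), if_pos (by simp only [List.length_cons]; omega)]
      simp [hg1]
    · have hg1n : g1 n = g n := by simp [hg1, hns]
      by_cases hin : s + 1 ≤ n ∧ n < s + 1 + cs.length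
      · have h3 : (s ≤ n ∧ n < s + (c :: cs).length) := by simp only [List.length_cons]; omega
        rw [if_pos hin, if_pos h3, hg1n]
        simp only [show (n < max M (s + 1)) ↔ (n < M) from by omega]
        rw [show n - s = (n - (s + 1)) + 1 from by omega, List.getD_cons_succ]
      · have h3 : ¬ (s ≤ n ∧ n < s + (c :: cs).length) := by simp only [List.length_cons]; omega
        rw [if_neg hin, if_neg h3, hg1n]
theorem outerB (rows : List (List String)) : ∀ (M : Nat) (g : Nat → Int × Int)
    (d : PySem.Dict Int (Int × Int)),
    d.items = (List.range M).map (fun (n : Nat) => ((n:Int), g n)) →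
    (∀ n, M ≤ n → g n = (0, 0)) →
    (rows.foldl (fun stats row =>
        (PySem.List.enumerate row 0).foldl (fun stats p =>
          let vt := stats.getD p.1 (0, 0)
          let valid := if (normalize_label p.2).isSome then vt.1 + 1 else vt.1
          stats.insert p.1 (valid, vt.2 + 1)) stats) d).items
      = (List.range (rows.foldl (fun m r => max m r.length) M)).map
          (fun (n : Nat) => ((n:Int), ((g n).1 + (pvV rows n : Int), (g n).2 + (pvT rows n : Int)))) := by
  induction rows with
  | nil =>
    intro M g d hitems hz
    simp only [List.foldl_nil, hitems]
    refine List.map_congr_left ?_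
    intro n hn
    simp [pvV, pvT]
  | cons r t ih =>
    intro M g d hitems hz
    rw [List.foldl_cons, List.foldl_cons]
    have hinner := innerB r 0 M g d (Nat.zero_le M) hitems
    set g2 : Nat → Int × Int := fun n =>
      if 0 ≤ n ∧ n < 0 + r.length then pvBump (if n < M then g n else (0, 0)) (r.getD (n - 0) "")
      else g n with hg2
    have hz2 : ∀ n, max M (0 + r.length) ≤ n → g2 n = (0, 0) := by
      intro n hn
      simp only [hg2]
      rw [if_neg (by omega)]
      exact hz n (by omega)
    have key := ih (max M (0 + r.length)) g2 _ hinner hz2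
    simp only [Nat.zero_add] at key
    refine key.trans ?_
    refine List.map_congr_left ?_
    intro n hn
    refine Prod.ext rfl ?_
    simp only [hg2, pvV, pvT, List.countP_cons]
    by_cases hr : n < r.length
    · rw [if_pos (show 0 ≤ n ∧ n < 0 + r.length by omega)]
      simp only [Nat.sub_zero, decide_eq_true hr, Bool.true_and]
      by_cases hM : n < M
      · rw [if_pos hM]
        cases ho : pvOk (r.getD n "") <;>
          refine Prod.ext ?_ ?_ <;>
            simp only [pvBump, ho, Bool.false_eq_true, eq_self_iff_true, if_false, if_true] <;>
            push_cast <;> ring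
      · rw [if_neg hM, hz n (by omega)]
        cases ho : pvOk (r.getD n "") <;>
          refine Prod.ext ?_ ?_ <;>
            simp only [pvBump, ho, Bool.false_eq_true, eq_self_iff_true, if_false, if_true] <;>
            push_cast <;> ring
    · rw [if_neg (by omega)]
      simp only [decide_eq_false hr, Bool.false_and, Bool.false_eq_true, if_false]
      refine Prod.ext ?_ ?_ <;> push_cast <;> ring
theorem bestFold (vt : Nat → Int × Int) : ∀ (W : Nat),
    ((List.range W).map (fun (n : Nat) => ((n:Int), vt n))).foldl
      (fun (best : Option Int) (p : Int × (Int × Int)) =>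
        if p.2.2 != 0 && p.2.1 == p.2.2 &&
            (match best with | none => true | some b => decide (b < p.1))
        then some p.1 else best) none
    = ((List.range W).filter (fun n => (vt n).2 != 0 && (vt n).1 == (vt n).2)).getLast?.map
        (fun (n : Nat) => ((n:Int))) := by
  intro W
  induction W with
  | zero => rfl
  | succ W ih =>
    rw [List.range_succ, List.map_append, List.foldl_append, List.filter_append, ih]
    simp only [List.map_cons, List.map_nil, List.foldl_cons, List.foldl_nil, List.filter_cons,
      List.filter_nil]
    have hmatch : (match ((List.range W).filter
          (fun n => (vt n).2 != 0 && (vt n).1 == (vt n).2)).getLast?.map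
            (fun (n : Nat) => ((n:Int))) with
          | none => true | some b => decide (b < ((W:Nat):Int))) = true := by
      rcases hL : ((List.range W).filter
          (fun n => (vt n).2 != 0 && (vt n).1 == (vt n).2)).getLast? with _ | m
      · simp [hL]
      · have hm : m ∈ List.range W := List.mem_filter.mp (List.mem_of_getLast? hL) |>.1
        have : m < W := List.mem_range.mp hm
        simp only [Option.map_some]
        exact decide_eq_true (by exact_mod_cast this)
    rw [hmatch, Bool.and_true]
    cases hq : ((vt W).2 != 0 && (vt W).1 == (vt W).2)
    · simp only [Bool.false_eq_true, if_false, List.append_nil]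
    · simp only [if_true, List.getLast?_concat, Option.map_some]
theorem b_eq_ans (rows : List (List String)) (h : rows ≠ []) :
    infer_label_idx_alt rows = pvAns rows := by
  unfold infer_label_idx_alt
  rw [if_neg h]
  suffices hs : ((rows.foldl (fun stats row =>
        (PySem.List.enumerate row 0).foldl (fun stats p =>
          let vt := stats.getD p.1 (0, 0)
          let valid := if (normalize_label p.2).isSome then vt.1 + 1 else vt.1
          stats.insert p.1 (valid, vt.2 + 1)) stats) (PySem.Dict.empty : PySem.Dict Int (Int × Int))).items).foldl
      (fun (best : Option Int) (p : Int × (Int × Int)) =>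
        if p.2.2 != 0 && p.2.1 == p.2.2 &&
            (match best with | none => true | some b => decide (b < p.1))
        then some p.1 else best) none = pvAns rows by exact hs
  have houter := outerB rows 0 (fun _ => ((0:Int), (0:Int))) PySem.Dict.empty (by rfl)
    (fun n _ => rfl)
  rw [houter, bestFold (fun n => ((0:Int) + ((pvV rows n : Nat) : Int),
    (0:Int) + ((pvT rows n : Nat) : Int)))]
  unfold pvAns
  have hW : rows.foldl (fun m r => max m r.length) 0 = pvW rows := rfl
  rw [hW]
  refine congrArg _ (congrArg List.getLast? ?_)
  apply List.filter_congr
  intro n hn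
  rw [Bool.eq_iff_iff]
  simp [pvQ, bne_iff_ne, Nat.cast_inj]

-- ===== VERDICT (by name: the statement is the Claim_ definition above) =====
theorem infer_label_idx_spec : Claim_equal_infer_label_idx := by
  intro rows _
  unfold Spec_infer_label_idx
  by_cases h : rows = []
  · subst h; rfl
  · rw [a_eq_ans rows h, b_eq_ans rows h]
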